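-- pv_equiv track=rewrite | github.com/hi-z-k/leetcode | 0697-degree-of-an-array/0697-degree-of-an-array.py | numOccurence
-- ===== SOURCE A (Python) =====
-- from typing import Dict, List
--
-- def numOccurence(nums: List[int]) -> Dict[int, Dict[str, int]]:
--     numsHash = {}
--     for index,num in enumerate(nums):
--         if num not in numsHash:
--             val = {}
--             val["first"] = index
--             val["last"] = index
--             val["count"] = 1
--             numsHash[num] = val
--         else:
--             numsHash[num]["count"] += 1
--             numsHash[num]["last"] = index
--     return numsHash
-- ===== SOURCE B (Python) =====
-- def numOccurence(nums):
--     count = {}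
--     for num in nums:
--         count[num] = count.get(num, 0) + 1
--     last = {num: i for i, num in enumerate(nums)}
--     first = {}
--     for i, num in enumerate(nums):
--         first.setdefault(num, i)
--     return {k: {"first": first[k], "last": last[k], "count": count[k]} for k in count}
-- ===== Notes on version B (the rewrite author's own statement) =====
-- stated objective: alternative
-- what changed: Replaces A's single fused pass maintaining a nested dict with three independent passes (a count map, a last-index dict comprehension, a first-index setdefault loop) assembled afterwards by iterating the count keys.
import Mathlib
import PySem

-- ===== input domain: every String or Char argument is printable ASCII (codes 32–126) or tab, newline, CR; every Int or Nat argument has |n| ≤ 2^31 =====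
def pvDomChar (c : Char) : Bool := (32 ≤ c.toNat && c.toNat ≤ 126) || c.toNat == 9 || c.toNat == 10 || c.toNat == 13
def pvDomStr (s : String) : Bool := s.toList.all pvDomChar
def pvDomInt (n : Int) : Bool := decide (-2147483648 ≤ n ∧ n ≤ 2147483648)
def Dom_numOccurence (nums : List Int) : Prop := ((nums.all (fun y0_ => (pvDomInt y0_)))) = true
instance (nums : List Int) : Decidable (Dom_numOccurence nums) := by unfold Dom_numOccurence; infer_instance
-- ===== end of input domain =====

-- B replaces A's single fused pass over a nested dict with three independent passes (count, last, first) assembled afterwards; same cost, different decomposition.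

-- ===== PORT A =====
def numOccurence (nums : List Int) : List (Int × List (String × Int)) :=
  (((PySem.List.enumerate nums).foldl (fun h (p : Int × Int) =>
      if ¬ (h.contains p.2) then
        -- val = {}; val["first"]=i; val["last"]=i; val["count"]=1; numsHash[num]=val
        h.insert p.2 (((PySem.Dict.empty.insert "first" p.1).insert "last" p.1).insert "count" 1)
      else
        -- numsHash[num]["count"] += 1 ("count" is always present); numsHash[num]["last"] = i
        h.modify p.2 PySem.Dict.empty (fun v => (v.modify "count" 0 (· + 1)).insert "last" p.1))
    PySem.Dict.empty)).items.map (fun q => (q.1, q.2.items))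

-- ===== PORT B =====
def numOccurence_alt (nums : List Int) : List (Int × List (String × Int)) :=
  let count := nums.foldl (fun (d : PySem.Dict Int Int) x => d.insert x (d.getD x 0 + 1)) PySem.Dict.empty
  let last := (PySem.List.enumerate nums).foldl (fun (d : PySem.Dict Int Int) p => d.insert p.2 p.1) PySem.Dict.empty
  let first := (PySem.List.enumerate nums).foldl (fun (d : PySem.Dict Int Int) p => d.setdefault p.2 p.1) PySem.Dict.empty
  -- first[k] / last[k] ported as getD _ 0: every key of count occurs in nums, so both lookups succeed
  count.keys.map (fun k => (k, [("first", first.getD k 0), ("last", last.getD k 0), ("count", count.getD k 0)]))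

-- ===== PRECONDITION & SPEC =====
def Spec_numOccurence (nums : List Int) (out : List (Int × List (String × Int))) : Prop := out = numOccurence_alt nums
instance (nums : List Int) (out : List (Int × List (String × Int))) : Decidable (Spec_numOccurence nums out) := by unfold Spec_numOccurence; infer_instance

-- ===== CLAIM (what is proved, stated in full; the proofs are below) =====
def Claim_equal_numOccurence : Prop := ∀ (nums : List Int), Dom_numOccurence nums → Spec_numOccurence nums (numOccurence nums)

-- ===== LEMMAS AND PROOFS =====

-- first index of k in xs (xs.length if absent), as an Int
def fIdx (xs : List Int) (k : Int) : Int := (List.idxOf k xs : Int)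
-- last index of k in xs (meaningful only for k ∈ xs)
def lIdx (xs : List Int) (k : Int) : Int := (xs.length : Int) - 1 - (List.idxOf k xs.reverse : Int)

theorem fIdx_snoc_mem (xs : List Int) (x k : Int) (h : k ∈ xs) :
    fIdx (xs ++ [x]) k = fIdx xs k := by
  simp [fIdx, List.idxOf_append_of_mem h]

theorem fIdx_snoc_self (xs : List Int) (x : Int) (h : x ∉ xs) :
    fIdx (xs ++ [x]) x = (xs.length : Int) := by
  simp [fIdx, List.idxOf_append_of_notMem h]

theorem lIdx_snoc_self (xs : List Int) (x : Int) :
    lIdx (xs ++ [x]) x = (xs.length : Int) := by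
  simp [lIdx]

theorem lIdx_snoc_ne (xs : List Int) (x k : Int) (h : k ≠ x) :
    lIdx (xs ++ [x]) k = lIdx xs k := by
  simp only [lIdx, List.reverse_append, List.reverse_cons, List.reverse_nil, List.nil_append,
    List.cons_append, List.nil_append, List.length_append, List.length_cons, List.length_nil]
  rw [List.idxOf_cons_ne _ (by simpa using (Ne.symm h))]
  push_cast; ring

-- the inner-dict update of A in closed form
theorem inner_update (f l c n : Int) :
    ((PySem.Dict.mk [("first",f),("last",l),("count",c)]).modify "count" 0 (· + 1)).insert "last" n
      = PySem.Dict.mk [("first",f),("last",n),("count",c+1)] := by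
  simp [PySem.Dict.modify, PySem.Dict.insert, PySem.Dict.getD, PySem.Dict.get?, PySem.Dict.contains]

-- A's outer fold, characterised
theorem A_char (xs : List Int) :
    ((PySem.List.enumerate xs).foldl (fun h (p : Int × Int) =>
      if ¬ (h.contains p.2) then
        h.insert p.2 (((PySem.Dict.empty.insert "first" p.1).insert "last" p.1).insert "count" 1)
      else
        h.modify p.2 PySem.Dict.empty (fun v => (v.modify "count" 0 (· + 1)).insert "last" p.1))
    PySem.Dict.empty).items
      = (PySem.Set.ofList xs).map (fun k =>
          (k, PySem.Dict.mk [("first", fIdx xs k), ("last", lIdx xs k), ("count", (xs.count k : Int))])) := by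
  induction xs using List.reverseRecOn with
  | nil => rfl
  | append_singleton xs x ih =>
    rw [PySem.List.enumerate_append, List.foldl_append]
    simp only [PySem.List.enumerate_cons, PySem.List.enumerate_nil, List.foldl_cons, List.foldl_nil,
      zero_add]
    generalize hF : ((PySem.List.enumerate xs).foldl (fun h (p : Int × Int) =>
      if ¬ (h.contains p.2) then
        h.insert p.2 (((PySem.Dict.empty.insert "first" p.1).insert "last" p.1).insert "count" 1)
      else
        h.modify p.2 PySem.Dict.empty (fun v => (v.modify "count" 0 (· + 1)).insert "last" p.1))
      PySem.Dict.empty) = F at ih ⊢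
    have hkeys : F.keys = PySem.Set.ofList xs := by
      simp [PySem.Dict.keys, ih, List.map_map, Function.comp_def]
    have hnd : F.keys.Nodup := by rw [hkeys]; exact PySem.Set.nodup_ofList xs
    have hcont : F.contains x = decide (x ∈ xs) := by
      rw [PySem.Dict.contains_eq_decide_mem_keys, hkeys]
      simp [PySem.Set.mem_ofList]
    by_cases hx : x ∈ xs
    · -- x already seen: A takes the modify branch
      have hc : F.contains x = true := by rw [hcont]; simpa using hx
      rw [if_neg (by simp [hc])]
      have hmem : (x, PySem.Dict.mk [("first", fIdx xs x), ("last", lIdx xs x), ("count", (xs.count x : Int))]) ∈ F.items := by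
        rw [ih]
        exact List.mem_map.2 ⟨x, (PySem.Set.mem_ofList _ _).2 hx, rfl⟩
      have hgetD : F.getD x PySem.Dict.empty
          = PySem.Dict.mk [("first", fIdx xs x), ("last", lIdx xs x), ("count", (xs.count x : Int))] :=
        PySem.Dict.getD_of_mem_items F hmem hnd _
      show (F.insert x _).items = _
      rw [hgetD]
      dsimp only
      rw [inner_update, PySem.Dict.items_insert_of_contains F _ hc, ih, List.map_map,
        PySem.Set.ofList_append_singleton, PySem.Set.add_of_mem ((PySem.Set.mem_ofList _ _).2 hx)]
      refine List.map_congr_left (fun k hk => ?_)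
      have hknd : k ∈ xs := (PySem.Set.mem_ofList _ _).1 hk
      by_cases hkx : k = x
      · subst hkx
        simp only [Function.comp, beq_self_eq_true, if_pos]
        rw [fIdx_snoc_mem _ _ _ hknd, lIdx_snoc_self]
        simp only [List.count_append, List.count_singleton]
        push_cast
        simp
      · simp only [Function.comp]
        rw [if_neg (by simpa using hkx)]
        rw [fIdx_snoc_mem _ _ _ hknd, lIdx_snoc_ne _ _ _ hkx]
        simp [List.count_append, List.count_eq_zero, hkx]
    · -- x unseen: A takes the insert branch
      have hc : F.contains x = false := by rw [hcont]; simpa using hx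
      rw [if_pos (by simp [hc])]
      rw [PySem.Dict.items_insert_of_not_contains F _ hc, ih,
        PySem.Set.ofList_append_singleton, PySem.Set.add_of_not_mem (by simpa [PySem.Set.mem_ofList] using hx),
        List.map_append]
      congr 1
      · refine List.map_congr_left (fun k hk => ?_)
        have hknd : k ∈ xs := (PySem.Set.mem_ofList _ _).1 hk
        have hkx : k ≠ x := fun h => hx (h ▸ hknd)
        rw [fIdx_snoc_mem _ _ _ hknd, lIdx_snoc_ne _ _ _ hkx]
        simp [List.count_append, List.count_eq_zero, hkx]
      · rw [List.map_singleton, fIdx_snoc_self _ _ hx, lIdx_snoc_self]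
        have : (xs ++ [x]).count x = 1 := by
          simp [List.count_append, List.count_eq_zero_of_not_mem hx]
        rw [this]
        simp only [Nat.cast_one]
        rfl

theorem last_char (xs : List Int) (k : Int) (hk : k ∈ xs) :
    ((PySem.List.enumerate xs).foldl (fun (d : PySem.Dict Int Int) p => d.insert p.2 p.1) PySem.Dict.empty).getD k 0
      = lIdx xs k := by
  induction xs using List.reverseRecOn generalizing k with
  | nil => cases hk
  | append_singleton xs x ih =>
    rw [PySem.List.enumerate_append, List.foldl_append]
    simp only [PySem.List.enumerate_cons, PySem.List.enumerate_nil, List.foldl_cons, List.foldl_nil]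
    rw [PySem.Dict.getD_insert]
    by_cases hx : k = x
    · subst hx; rw [lIdx_snoc_self]; simp
    · have hkxs : k ∈ xs := by
        rcases List.mem_append.1 hk with h | h
        · exact h
        · simp at h; exact absurd h hx
      rw [if_neg hx, lIdx_snoc_ne _ _ _ hx, ih _ hkxs]

theorem first_char (xs : List Int) (k : Int) (hk : k ∈ xs) :
    ((PySem.List.enumerate xs).foldl (fun (d : PySem.Dict Int Int) p => d.setdefault p.2 p.1) PySem.Dict.empty).getD k 0
      = fIdx xs k := by
  have main : ∀ (xs : List Int) (k : Int),
      (((PySem.List.enumerate xs).foldl (fun (d : PySem.Dict Int Int) p => d.setdefault p.2 p.1) PySem.Dict.empty).contains k = decide (k ∈ xs))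
      ∧ (k ∈ xs → ((PySem.List.enumerate xs).foldl (fun (d : PySem.Dict Int Int) p => d.setdefault p.2 p.1) PySem.Dict.empty).getD k 0 = fIdx xs k) := by
    intro xs
    induction xs using List.reverseRecOn with
    | nil => intro k; simp [PySem.List.enumerate_nil, PySem.Dict.contains_empty]
    | append_singleton xs x ih =>
      intro k
      rw [PySem.List.enumerate_append]
      simp only [PySem.List.enumerate_cons, PySem.List.enumerate_nil, List.foldl_append,
        List.foldl_cons, List.foldl_nil]
      by_cases hxm : x ∈ xs
      · have hc : (((PySem.List.enumerate xs).foldl (fun (d : PySem.Dict Int Int) p => d.setdefault p.2 p.1) PySem.Dict.empty).contains x) = true := by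
          rw [(ih x).1]; simpa using hxm
        rw [PySem.Dict.setdefault_of_contains _ _ hc]
        constructor
        · rw [(ih k).1]
          by_cases hkx : k = x
          · subst hkx; simp [hxm]
          · simp [hkx]
        · intro hk
          by_cases hkx : k = x
          · subst hkx
            rw [(ih k).2 hxm, fIdx_snoc_mem _ _ _ hxm]
          · have hkxs : k ∈ xs := by
              rcases List.mem_append.1 hk with h | h
              · exact h
              · simp at h; exact absurd h hkx
            rw [(ih k).2 hkxs, fIdx_snoc_mem _ _ _ hkxs]
      · have hc : (((PySem.List.enumerate xs).foldl (fun (d : PySem.Dict Int Int) p => d.setdefault p.2 p.1) PySem.Dict.empty).contains x) = false := by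
          rw [(ih x).1]; simpa using hxm
        rw [PySem.Dict.setdefault_of_not_contains _ _ hc]
        constructor
        · rw [PySem.Dict.contains_insert, (ih k).1]
          by_cases hkx : k = x
          · subst hkx; simp
          · simp [hkx]
        · intro hk
          rw [PySem.Dict.getD_insert]
          by_cases hkx : k = x
          · subst hkx; rw [if_pos rfl, fIdx_snoc_self _ _ hxm]; simp
          · have hkxs : k ∈ xs := by
              rcases List.mem_append.1 hk with h | h
              · exact h
              · simp at h; exact absurd h hkx
            rw [if_neg hkx, (ih k).2 hkxs, fIdx_snoc_mem _ _ _ hkxs]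
  exact (main xs k).2 hk

theorem count_keys (xs : List Int) :
    (xs.foldl (fun (d : PySem.Dict Int Int) x => d.insert x (d.getD x 0 + 1)) PySem.Dict.empty).keys
      = PySem.Set.ofList xs := by
  rw [PySem.Dict.keys_foldl_insert]
  simp [PySem.Dict.keys_empty, PySem.Set.update_nil_left]

-- ===== VERDICT (by name: the statement is the Claim_ definition above) =====
theorem numOccurence_spec : Claim_equal_numOccurence := by
  intro nums _
  show numOccurence nums = numOccurence_alt nums
  unfold numOccurence numOccurence_alt
  dsimp only
  rw [A_char, count_keys, List.map_map]
  refine List.map_congr_left (fun k hk => ?_)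
  have hkx : k ∈ nums := (PySem.Set.mem_ofList _ _).1 hk
  rw [first_char nums k hkx, last_char nums k hkx,
    PySem.Dict.getD_foldl_insert_add_one]
  simp [PySem.Dict.getD_empty]
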